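-- pv_equiv track=rewrite | github.com/LouieShao/BWR | core/BWR_Decompress.py | DPCM_Refilter
-- ===== SOURCE A (Python) =====
-- def DPCM_Refilter(filtereddata):
--     outputarr=[]
--     outputarr.append(filtereddata[0])
--     outputarr.append(filtereddata[1])
--     outputarr.append(filtereddata[2])
--     for i in range(3,len(filtereddata)):
--         outputarr.append(filtereddata[i]+outputarr[i-3])
--     return outputarr
-- ===== SOURCE B (Python) =====
-- def DPCM_Refilter(filtereddata):
--     n = len(filtereddata)
--     chans = []
--     for r in range(3):
--         acc = 0
--         ch = []
--         for i in range(r, n, 3):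
--             acc += filtereddata[i]
--             ch.append(acc)
--         chans.append(ch)
--     return [chans[i % 3][i // 3] for i in range(n)]
-- ===== Notes on version B (the rewrite author's own statement) =====
-- stated objective: alternative
-- what changed: A does one sequential scan appending filtereddata[i]+out[i-3]; B factors the signal into three independent stride-3 channels, computes each channel as a plain running cumulative sum, and interleaves them back by index arithmetic (i%3, i//3).
-- crash fix: On lists shorter than 3 elements A raises IndexError from its unconditional reads of positions 0,1,2; B naturally returns the (partial) reconstruction, e.g. [5] on [5]. — e.g. on DPCM_Refilter([5]): A raises IndexError, B returns [5]
import Mathlib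
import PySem

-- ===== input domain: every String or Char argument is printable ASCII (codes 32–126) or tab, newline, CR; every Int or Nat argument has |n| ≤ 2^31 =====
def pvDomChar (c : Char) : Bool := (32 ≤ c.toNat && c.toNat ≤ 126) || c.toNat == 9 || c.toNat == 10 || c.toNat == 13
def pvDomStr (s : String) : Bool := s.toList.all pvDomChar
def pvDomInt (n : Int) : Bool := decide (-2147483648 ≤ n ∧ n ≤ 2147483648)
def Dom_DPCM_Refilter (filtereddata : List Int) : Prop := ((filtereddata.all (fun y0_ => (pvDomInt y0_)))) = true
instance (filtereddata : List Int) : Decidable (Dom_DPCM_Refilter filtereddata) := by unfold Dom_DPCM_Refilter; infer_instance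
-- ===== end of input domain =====

-- B reconstructs the DPCM stream as three independent stride-3 cumulative-sum channels
-- interleaved by index arithmetic, instead of A's single sequential scan (objective: alternative).
-- On inputs shorter than 3 the Python A raises IndexError (excluded by Pre_); B returns the partial reconstruction.

-- ===== PORT A =====
def DPCM_Refilter (filtereddata : List Int) : List Int :=
  let out0 : List Int :=
    [PySem.List.pyGetD filtereddata 0 0, PySem.List.pyGetD filtereddata 1 0,
     PySem.List.pyGetD filtereddata 2 0]
  (PySem.List.pyRange 3 (filtereddata.length : Int) 1).foldl
    (fun out i => out ++ [PySem.List.pyGetD filtereddata i 0 + PySem.List.pyGetD out (i - 3) 0])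
    out0

-- ===== PORT B =====
-- inner channel loop of B: running accumulator, appending each cumulative sum
def pvCum (fd : List Int) (idxs : List Int) : Int × List Int :=
  idxs.foldl
    (fun (s : Int × List Int) i =>
      let acc := s.1 + PySem.List.pyGetD fd i 0
      (acc, s.2 ++ [acc]))
    (0, [])

def DPCM_Refilter_alt (filtereddata : List Int) : List Int :=
  let n : Int := (filtereddata.length : Int)
  let chans : List (List Int) :=
    (PySem.List.pyRange 0 3 1).foldl
      (fun chans r => chans ++ [(pvCum filtereddata (PySem.List.pyRange r n 3)).2]) []
  (PySem.List.pyRange 0 n 1).map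
    (fun i =>
      PySem.List.pyGetD (PySem.List.pyGetD chans (PySem.Int.mod i 3) [])
        (PySem.Int.floordiv i 3) 0)

-- ===== PRECONDITION & SPEC =====
-- Pre_ excludes exactly the inputs with fewer than 3 elements, on which A raises IndexError.
def Pre_DPCM_Refilter (filtereddata : List Int) : Prop := 3 ≤ filtereddata.length
instance (filtereddata : List Int) : Decidable (Pre_DPCM_Refilter filtereddata) := by
  unfold Pre_DPCM_Refilter; infer_instance

def pvWitness_DPCM_Refilter : List Int := [4, -1, 7, 2]

-- On lists shorter than 3 elements A raises IndexError from its unconditional reads of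
-- positions 0,1,2; B naturally returns the (partial) reconstruction, e.g. [5] on [5].
def Raises_DPCM_Refilter (filtereddata : List Int) : Prop := filtereddata.length < 3
instance (filtereddata : List Int) : Decidable (Raises_DPCM_Refilter filtereddata) := by
  unfold Raises_DPCM_Refilter; infer_instance

def pvRaiseWitness_DPCM_Refilter : List Int := [5]
def pvRaiseWitnessOut_DPCM_Refilter : List Int := [5]

def Spec_DPCM_Refilter (filtereddata : List Int) (out : List Int) : Prop :=
  out = DPCM_Refilter_alt filtereddata
instance (filtereddata : List Int) (out : List Int) : Decidable (Spec_DPCM_Refilter filtereddata out) := by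
  unfold Spec_DPCM_Refilter; infer_instance

-- ===== CLAIM (what is proved, stated in full; the proofs are below) =====
def Claim_equal_DPCM_Refilter : Prop :=
  ∀ (filtereddata : List Int), Dom_DPCM_Refilter filtereddata →
    Pre_DPCM_Refilter filtereddata →
    Spec_DPCM_Refilter filtereddata (DPCM_Refilter filtereddata)

def Claim_raises_DPCM_Refilter : Prop :=
  (∀ (filtereddata : List Int), Dom_DPCM_Refilter filtereddata →
      Raises_DPCM_Refilter filtereddata → ¬ Pre_DPCM_Refilter filtereddata) ∧
  (Dom_DPCM_Refilter (pvRaiseWitness_DPCM_Refilter) ∧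
   Raises_DPCM_Refilter (pvRaiseWitness_DPCM_Refilter) ∧
   DPCM_Refilter_alt (pvRaiseWitness_DPCM_Refilter) = pvRaiseWitnessOut_DPCM_Refilter)

-- ===== LEMMAS AND PROOFS =====

-- the common reference value: pvS fd i = the reconstructed sample at index i
def pvS (fd : List Int) : Nat → Int
  | 0 => fd.getD 0 0
  | 1 => fd.getD 1 0
  | 2 => fd.getD 2 0
  | (i+3) => fd.getD (i+3) 0 + pvS fd i

-- A's loop body, named so the invariant lemma can state it
def pvStepA (fd : List Int) (out : List Int) (i : Int) : List Int :=
  out ++ [PySem.List.pyGetD fd i 0 + PySem.List.pyGetD out (i - 3) 0]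

theorem pvA_go (fd : List Int) (j : Nat) (h : 3 + j ≤ fd.length) :
    (PySem.List.pyRange 3 ((3 + j : Nat) : Int) 1).foldl (pvStepA fd)
      ((List.range 3).map (pvS fd)) = (List.range (3 + j)).map (pvS fd) := by
  induction j with
  | zero =>
    rw [PySem.List.pyRange_one_eq_nil (by norm_num)]
    rfl
  | succ k ih =>
    have hcast : ((3 + (k+1) : Nat) : Int) = ((3 + k : Nat) : Int) + 1 := by push_cast; ring
    rw [hcast, PySem.List.pyRange_one_succ_right (by push_cast; omega), List.foldl_append]
    rw [ih (by omega)]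
    show pvStepA fd _ _ = _
    unfold pvStepA
    have h1 : PySem.List.pyGetD fd ((3 + k : Nat) : Int) 0 = fd.getD (3 + k) 0 :=
      PySem.List.pyGetD_natCast fd (3+k) 0
    have h2 : ((3 + k : Nat) : Int) - 3 = ((k : Nat) : Int) := by push_cast; ring
    rw [h1, h2, PySem.List.pyGetD_natCast, PySem.List.getD_map_range _ _ _ _ (by omega)]
    rw [show 3 + (k+1) = (3 + k) + 1 by omega, List.range_succ, List.map_append]
    have : pvS fd (3 + k) = fd.getD (3 + k) 0 + pvS fd k := by
      rw [show 3 + k = k + 3 by omega]; simp [pvS, show k + 3 = 3 + k by omega]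
    simp [this]

theorem A_char (fd : List Int) (h : 3 ≤ fd.length) :
    DPCM_Refilter fd = (List.range fd.length).map (pvS fd) := by
  unfold DPCM_Refilter
  have hout0 : [PySem.List.pyGetD fd 0 0, PySem.List.pyGetD fd 1 0, PySem.List.pyGetD fd 2 0]
      = (List.range 3).map (pvS fd) := by
    rw [PySem.List.pyGetD_ofNat' fd 0 0, PySem.List.pyGetD_ofNat' fd 1 0,
      PySem.List.pyGetD_ofNat' fd 2 0]
    rfl
  have hlen : fd.length = 3 + (fd.length - 3) := by omega
  rw [hout0]
  calc (PySem.List.pyRange 3 (fd.length : Int) 1).foldl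
        (fun out i => out ++ [PySem.List.pyGetD fd i 0 + PySem.List.pyGetD out (i - 3) 0])
        ((List.range 3).map (pvS fd))
      = (PySem.List.pyRange 3 ((3 + (fd.length - 3) : Nat) : Int) 1).foldl (pvStepA fd)
        ((List.range 3).map (pvS fd)) := by rw [← hlen]; rfl
    _ = (List.range (3 + (fd.length - 3))).map (pvS fd) := pvA_go fd _ (by omega)
    _ = (List.range fd.length).map (pvS fd) := by rw [← hlen]

-- the value of B's inner channel loop, written structurally
def pvCums (fd : List Int) (a : Int) : List Int → List Int
  | [] => []
  | i :: t => (a + PySem.List.pyGetD fd i 0) :: pvCums fd (a + PySem.List.pyGetD fd i 0) t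

theorem pvCum_snd (fd : List Int) : ∀ (idxs : List Int) (a : Int) (l : List Int),
    (idxs.foldl (fun (s : Int × List Int) i =>
      let acc := s.1 + PySem.List.pyGetD fd i 0
      (acc, s.2 ++ [acc])) (a, l)).2 = l ++ pvCums fd a idxs := by
  intro idxs
  induction idxs with
  | nil => simp [pvCums]
  | cons i t ih =>
    intro a l
    simp only [List.foldl_cons, ih, pvCums, List.append_assoc, List.cons_append, List.nil_append]

-- along a stride-3 index progression the running sums are exactly pvS
theorem pvCums_prog (fd : List Int) (r : Nat) (hr : r < 3) :
    ∀ (c j : Nat),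
      pvCums fd (if j = 0 then 0 else pvS fd (r + 3*(j-1)))
        ((List.range' j c).map (fun k : Nat => ((r:Int) + 3*(k:Int)))) =
      (List.range' j c).map (fun k => pvS fd (r + 3*k)) := by
  intro c
  induction c with
  | zero => intro j; simp [pvCums]
  | succ m ih =>
    intro j
    rw [List.range'_succ, List.map_cons, List.map_cons]
    have hidx : ((r:Int) + 3*(j:Int)) = ((r + 3*j : Nat) : Int) := by push_cast; ring
    have hg : PySem.List.pyGetD fd ((r:Int) + 3*(j:Int)) 0 = fd.getD (r + 3*j) 0 := by
      rw [hidx]; exact PySem.List.pyGetD_natCast fd (r + 3*j) 0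
    have hval : (if j = 0 then (0:Int) else pvS fd (r + 3*(j-1)))
        + PySem.List.pyGetD fd ((r:Int) + 3*(j:Int)) 0 = pvS fd (r + 3*j) := by
      rw [hg]
      rcases Nat.eq_zero_or_pos j with hj | hj
      · subst hj
        simp only [if_pos rfl, Nat.mul_zero, Nat.add_zero]
        interval_cases r <;> simp [pvS]
      · rw [if_neg (by omega)]
        have h3 : r + 3*j = (r + 3*(j-1)) + 3 := by omega
        rw [h3]
        simp [pvS]
        ring
    rw [pvCums, hval]
    have := ih (j+1)
    rw [if_neg (by omega)] at this
    simp only [Nat.add_sub_cancel] at this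
    rw [this]

theorem pvChan_get (fd : List Int) (m : Nat) (hm : m < fd.length) :
    PySem.List.pyGetD (pvCum fd (PySem.List.pyRange ((m % 3 : Nat) : Int) ((fd.length : Nat) : Int) 3)).2
      ((m / 3 : Nat) : Int) 0 = pvS fd m := by
  have hif : ((m % 3 : Nat) : Int) < ((fd.length : Nat) : Int) := by
    have := Nat.mod_le m 3; exact_mod_cast by omega
  rw [PySem.List.pyRange_of_pos _ _ (by norm_num)]
  unfold pvCum
  rw [pvCum_snd, List.nil_append, List.range_eq_range']
  have h := pvCums_prog fd (m % 3) (by omega)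
    ((if ((m % 3 : Nat) : Int) < ((fd.length : Nat) : Int) then
      ((((fd.length : Nat) : Int) - ((m % 3 : Nat) : Int) + 3 - 1) / 3).toNat else 0)) 0
  rw [if_pos rfl] at h
  rw [h, PySem.List.pyGetD_natCast, ← List.range_eq_range']
  have hcnt : (if ((m % 3 : Nat) : Int) < ((fd.length : Nat) : Int) then
      ((((fd.length : Nat) : Int) - ((m % 3 : Nat) : Int) + 3 - 1) / 3).toNat else 0)
      = (fd.length - m % 3 + 2) / 3 := by
    rw [if_pos hif]
    have h1 : (((fd.length : Nat) : Int) - ((m % 3 : Nat) : Int) + 3 - 1)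
        = ((fd.length - m % 3 + 2 : Nat) : Int) := by
      have := Nat.mod_le m 3; push_cast; omega
    rw [h1]
    rw [show ((fd.length - m % 3 + 2 : Nat) : Int) / 3 = (((fd.length - m % 3 + 2) / 3 : Nat) : Int) from by
      exact_mod_cast (Int.ofNat_ediv_ofNat (a := fd.length - m % 3 + 2) (b := 3))]
    exact Int.toNat_natCast _
  rw [hcnt, PySem.List.getD_map_range _ _ _ _ (by omega)]
  congr 1
  omega

theorem B_char (fd : List Int) :
    DPCM_Refilter_alt fd = (List.range fd.length).map (pvS fd) := by
  unfold DPCM_Refilter_alt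
  have h3 : PySem.List.pyRange 0 3 1 = [0, 1, 2] := by decide
  rw [h3]
  simp only [List.foldl_cons, List.foldl_nil, List.nil_append, List.cons_append,
    List.append_nil, List.singleton_append]
  rw [PySem.List.pyRange_zero_nat, List.map_map]
  apply List.map_congr_left
  intro m hmem
  have hm : m < fd.length := List.mem_range.mp hmem
  simp only [Function.comp_apply]
  have hmod : PySem.Int.mod ((m : Nat) : Int) 3 = ((m % 3 : Nat) : Int) := by
    exact_mod_cast PySem.Int.mod_natCast m 3
  have hdiv : PySem.Int.floordiv ((m : Nat) : Int) 3 = ((m / 3 : Nat) : Int) := by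
    exact_mod_cast PySem.Int.floordiv_natCast m 3
  rw [hmod, hdiv, PySem.List.pyGetD_natCast]
  have hc := pvChan_get fd m hm
  rw [PySem.List.pyGetD_natCast] at hc
  have h03 : m % 3 = 0 ∨ m % 3 = 1 ∨ m % 3 = 2 := by omega
  rcases h03 with h | h | h <;>
    · rw [h] at hc ⊢
      simpa [PySem.List.pyGetD_ofNat', List.getD_eq_getElem?_getD] using hc

-- ===== VERDICT (by name: the statement is the Claim_ definition above) =====
theorem DPCM_Refilter_spec : Claim_equal_DPCM_Refilter := by
  intro fd _ hpre
  unfold Spec_DPCM_Refilter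
  rw [A_char fd hpre, B_char fd]

@[simp]
theorem DPCM_Refilter_raises : Claim_raises_DPCM_Refilter := by
  unfold Claim_raises_DPCM_Refilter
  exact ⟨by intro fd _ hr hp; unfold Raises_DPCM_Refilter at hr; unfold Pre_DPCM_Refilter at hp; omega,
    by decide⟩
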